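-- pv_equiv track=rewrite | github.com/Preet-Shah04/Chatbot-Voice-assist- | main.py | last_sender
-- ===== SOURCE A (Python) =====
-- def last_sender(chat, your_name):
--     lines = chat.strip().splitlines()
--     for line in reversed(lines):
--         if "] " in line and ": " in line:
--             try:
--                 sender_line = line.split("] ", 1)[1]
--                 sender = sender_line.split(": ", 1)[0].strip()
--                 return sender
--             except:
--                 continue
--     return None
-- ===== SOURCE B (Python) =====
-- def last_sender(chat, your_name):
--     result = None
--     for line in chat.strip().splitlines():
--         if "] " in line and ": " in line:
--             result = line.split("] ", 1)[1].split(": ", 1)[0].strip()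
--     return result
-- ===== Notes on version B (the rewrite author's own statement) =====
-- stated objective: simpler
-- what changed: Replaces the reversed early-return scan with try/except by a single forward pass that overwrites an accumulator on every matching line and returns it after the loop (the dead exception handler is dropped).
import Mathlib
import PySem

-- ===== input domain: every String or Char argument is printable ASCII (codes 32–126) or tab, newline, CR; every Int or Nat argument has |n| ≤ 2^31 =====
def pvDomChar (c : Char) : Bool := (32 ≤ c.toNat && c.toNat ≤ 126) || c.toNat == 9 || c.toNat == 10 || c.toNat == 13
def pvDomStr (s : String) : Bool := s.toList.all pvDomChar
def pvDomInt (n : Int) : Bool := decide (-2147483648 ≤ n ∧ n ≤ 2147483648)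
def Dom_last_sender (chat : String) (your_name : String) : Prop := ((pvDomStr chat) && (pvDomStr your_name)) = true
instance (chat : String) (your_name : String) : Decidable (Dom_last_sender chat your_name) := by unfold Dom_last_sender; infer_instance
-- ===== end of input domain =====

-- B replaces A's reversed early-return scan (with its dead try/except) by one forward
-- pass that overwrites an accumulator on every matching line; objective: simpler.

-- ===== PORT A =====
-- the for-loop over reversed(lines): first matching line returns; an IndexError
-- (pyGet? = none) is the except branch and continues
def lsLoopA : List String → Option String
  | [] => none
  | line :: rest =>
    if PySem.Str.isIn "] " line && PySem.Str.isIn ": " line then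
      match (PySem.Str.splitMax? line "] " 1).bind (fun ps => PySem.List.pyGet? ps 1) with
      | none => lsLoopA rest
      | some sender_line =>
        match (PySem.Str.splitMax? sender_line ": " 1).bind (fun qs => PySem.List.pyGet? qs 0) with
        | none => lsLoopA rest
        | some s => some (PySem.Str.strip s)
    else lsLoopA rest

def last_sender (chat : String) (_your_name : String) : Option String :=
  lsLoopA (PySem.Str.splitlines (PySem.Str.strip chat)).reverse

-- ===== PORT B =====
-- line.split("] ", 1)[1].split(": ", 1)[0].strip(); pyGet? = none is an unreachable
-- IndexError under the guard, on which the accumulator is kept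
def extractSender (line : String) : Option String :=
  (PySem.Str.splitMax? line "] " 1).bind fun ps =>
  (PySem.List.pyGet? ps 1).bind fun sender_line =>
  (PySem.Str.splitMax? sender_line ": " 1).bind fun qs =>
  (PySem.List.pyGet? qs 0).map fun s => PySem.Str.strip s

def last_sender_alt (chat : String) (_your_name : String) : Option String :=
  (PySem.Str.splitlines (PySem.Str.strip chat)).foldl
    (fun result line =>
      if PySem.Str.isIn "] " line && PySem.Str.isIn ": " line then
        match extractSender line with
        | some s => some s
        | none => result
      else result)
    none

-- ===== PRECONDITION & SPEC =====
def Spec_last_sender (chat : String) (your_name : String) (out : Option String) : Prop := out = last_sender_alt chat your_name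
instance (chat : String) (your_name : String) (out : Option String) : Decidable (Spec_last_sender chat your_name out) := by unfold Spec_last_sender; infer_instance

-- ===== CLAIM (what is proved, stated in full; the proofs are below) =====
def Claim_equal_last_sender : Prop := ∀ (chat : String) (your_name : String), Dom_last_sender chat your_name → Spec_last_sender chat your_name (last_sender chat your_name)

-- ===== LEMMAS AND PROOFS =====

-- B's step, named for the proof
def stepB (result : Option String) (line : String) : Option String :=
  if PySem.Str.isIn "] " line && PySem.Str.isIn ": " line then
    match extractSender line with
    | some s => some s
    | none => result
  else result

lemma lsLoopA_cons (line : String) (rest : List String) :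
    lsLoopA (line :: rest) = stepB (lsLoopA rest) line := by
  simp only [lsLoopA, stepB, extractSender]
  cases h1 : (PySem.Str.splitMax? line "] " 1) with
  | none => simp
  | some ps =>
    cases h2 : PySem.List.pyGet? ps 1 with
    | none => simp [h2]
    | some sl =>
      cases h3 : PySem.Str.splitMax? sl ": " 1 with
      | none => simp [h2, h3]
      | some qs =>
        cases h4 : PySem.List.pyGet? qs 0 with
        | none => simp [h2, h3, h4]
        | some s => simp [h2, h3, h4]

lemma stepB_match (o init : Option String) (x : String) :
    stepB (match o with | some s => some s | none => init) x
      = match stepB o x with | some s => some s | none => init := by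
  cases o <;> simp only [stepB] <;> split <;>
    first
      | rfl
      | (cases extractSender x <;> rfl)

lemma foldl_eq_loopA (l : List String) (init : Option String) :
    l.foldl stepB init =
      match lsLoopA l.reverse with
      | some s => some s
      | none => init := by
  induction l using List.reverseRecOn generalizing init with
  | nil => simp [lsLoopA]
  | append_singleton l' x ih =>
    rw [List.foldl_append, List.reverse_append, List.reverse_singleton, List.singleton_append,
      List.foldl_cons, List.foldl_nil, lsLoopA_cons, ih, stepB_match]

-- ===== VERDICT (by name: the statement is the Claim_ definition above) =====
theorem last_sender_spec : Claim_equal_last_sender := by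
  intro chat your_name _
  unfold Spec_last_sender last_sender last_sender_alt
  rw [show (fun (result : Option String) line => if PySem.Str.isIn "] " line && PySem.Str.isIn ": " line then (match extractSender line with | some s => some s | none => result) else result) = stepB from rfl]
  rw [foldl_eq_loopA]
  cases lsLoopA (PySem.Str.splitlines (PySem.Str.strip chat)).reverse <;> rfl
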